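-- pv_equiv track=rewrite | github.com/dheerosaur/ds-and-algorithms | python/arrays/between_ai_2ai.py | between_ai_2ai
-- ===== SOURCE A (Python) =====
-- def between_ai_2ai(A):
--     """
--     Brute-force algorithm O(n^2)
--     """
--     result = []
--     for i in range(len(A)):
--         count = 0
--         for j in range(i + 1, len(A)):
--             if A[j] >= 2 * A[i]:
--                 break
--             count += 1
--         result.append(count)
--
--     return result
-- ===== SOURCE B (Python) =====
-- from bisect import bisect_right
--
--
-- def between_ai_2ai(A):
--     """
--     Monotonic stack of suffix record maxima + binary search: O(n log n).
--     Scanning right-to-left, keep the strictly increasing "record" elements of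
--     the suffix (nvals stores their negated values, ascending; idxs the matching
--     indices).  The first element >= 2*A[i] after i is always such a record, so a
--     binary search on the stack finds it.
--     """
--     n = len(A)
--     res = []
--     nvals = []  # negated record values, ascending (farthest record first)
--     idxs = []   # matching indices (descending)
--     for i in range(n - 1, -1, -1):
--         k = bisect_right(nvals, -2 * A[i])
--         res.append(idxs[k - 1] - i - 1 if k > 0 else n - 1 - i)
--         while nvals and nvals[-1] >= -A[i]:
--             nvals.pop()
--             idxs.pop()
--         nvals.append(-A[i])
--         idxs.append(i)
--     res.reverse()
--     return res
-- ===== Notes on version B (the rewrite author's own statement) =====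
-- stated objective: faster
-- what changed: Replaced the per-element left-to-right suffix scan by a single right-to-left pass that maintains a monotonic stack of suffix record maxima and finds the first element >= 2*A[i] by binary search (bisect_right) on that stack.
import Mathlib
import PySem

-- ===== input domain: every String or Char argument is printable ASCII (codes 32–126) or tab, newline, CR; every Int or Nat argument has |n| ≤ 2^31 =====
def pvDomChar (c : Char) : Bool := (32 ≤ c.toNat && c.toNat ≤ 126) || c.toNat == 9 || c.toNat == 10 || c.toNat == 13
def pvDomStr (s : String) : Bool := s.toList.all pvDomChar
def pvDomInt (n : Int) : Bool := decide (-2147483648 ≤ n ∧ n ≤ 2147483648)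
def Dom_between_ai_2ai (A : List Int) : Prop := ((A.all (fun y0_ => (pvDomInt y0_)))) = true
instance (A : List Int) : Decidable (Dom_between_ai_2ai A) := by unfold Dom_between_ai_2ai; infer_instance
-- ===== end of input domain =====

-- B replaces A's O(n^2) suffix scan by a right-to-left monotonic stack of suffix
-- record maxima queried with binary search (bisect_right): measurably faster.

-- ===== PORT A =====
-- inner 'for j in range(i+1, len(A)): if A[j] >= 2*A[i]: break; count += 1'
-- (A[j] is always in range here, so the total pyGetD is exact)
def pvInnerA (A : List Int) (x : Int) (j : Int) (count : Int) : Int :=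
  if h : j < A.length then
    if x ≤ PySem.List.pyGetD A j 0 then count
    else pvInnerA A x (j + 1) (count + 1)
  else count
termination_by ((A.length : Int) - j).toNat
decreasing_by omega

def between_ai_2ai (A : List Int) : List Int :=
  (PySem.List.pyRange 0 A.length 1).foldl
    (fun result i => result ++ [pvInnerA A (2 * PySem.List.pyGetD A i 0) (i + 1) 0]) []

-- ===== PORT B =====
-- literal port of bisect.bisect_right(l, x) (lo=0, hi=len(l)); l[mid] is in range
def pvBisectRight (l : List Int) (x : Int) (lo hi : Nat) : Nat :=
  if h : lo < hi then
    if x < l.getD ((lo + hi) / 2) 0 then pvBisectRight l x lo ((lo + hi) / 2)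
    else pvBisectRight l x ((lo + hi) / 2 + 1) hi
  else lo
termination_by hi - lo
decreasing_by all_goals omega

-- 'while nvals and nvals[-1] >= -A[i]: nvals.pop(); idxs.pop()'  (na = -A[i])
def pvPop (nvals idxs : List Int) (na : Int) : List Int × List Int :=
  if h : nvals ≠ [] ∧ na ≤ PySem.List.pyGetD nvals (-1) 0 then
    pvPop nvals.dropLast idxs.dropLast na
  else (nvals, idxs)
termination_by nvals.length
decreasing_by
  have : 0 < nvals.length := List.length_pos_iff.mpr h.1
  simp [List.length_dropLast]; omega

-- loop body of B, state (res, nvals, idxs)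
def pvStepB (A : List Int) (n : Int) (st : List Int × List Int × List Int) (i : Int) :
    List Int × List Int × List Int :=
  let res := st.1
  let nvals := st.2.1
  let idxs := st.2.2
  let a := PySem.List.pyGetD A i 0
  let k := pvBisectRight nvals (-(2 * a)) 0 nvals.length
  let e := if 0 < k then idxs.getD (k - 1) 0 - i - 1 else n - 1 - i
  let p := pvPop nvals idxs (-a)
  (res ++ [e], p.1 ++ [-a], p.2 ++ [i])

def between_ai_2ai_alt (A : List Int) : List Int :=
  (((PySem.List.pyRange ((A.length : Int) - 1) (-1) (-1)).foldl
      (pvStepB A A.length) ([], [], []))).1.reverse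

-- ===== PRECONDITION & SPEC =====
def Spec_between_ai_2ai (A : List Int) (out : List Int) : Prop := out = between_ai_2ai_alt A
instance (A : List Int) (out : List Int) : Decidable (Spec_between_ai_2ai A out) := by unfold Spec_between_ai_2ai; infer_instance

-- ===== CLAIM (what is proved, stated in full; the proofs are below) =====
def Claim_equal_between_ai_2ai : Prop := ∀ (A : List Int), Dom_between_ai_2ai A → Spec_between_ai_2ai A (between_ai_2ai A)

-- ===== LEMMAS AND PROOFS =====

-- A[j] as the ports read it
def pvG (A : List Int) (j : Int) : Int := PySem.List.pyGetD A j 0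

-- first index ≥ j with A[index] ≥ x, or len(A) (for j ≤ len(A))
def pvFirst (A : List Int) (x : Int) (j : Int) : Int :=
  if h : j < A.length then
    if x ≤ pvG A j then j else pvFirst A x (j + 1)
  else j
termination_by ((A.length : Int) - j).toNat
decreasing_by omega

-- the answer Python A records for index i
def pvAns (A : List Int) (i : Int) : Int := pvFirst A (2 * pvG A i) (i + 1) - (i + 1)

-- suffix record maxima: indices j ∈ [k, len) with A[m] < A[j] for all m ∈ [k, j)
def pvRecs (A : List Int) (k : Int) : List Int :=
  if h : k < A.length then
    k :: (pvRecs A (k + 1)).filter (fun j => decide (pvG A k < pvG A j))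
  else []
termination_by ((A.length : Int) - k).toNat
decreasing_by omega

theorem pvFirst_bounds (A : List Int) (x : Int) (j : Int) (hj : j ≤ A.length) :
    j ≤ pvFirst A x j ∧ pvFirst A x j ≤ A.length := by
  unfold pvFirst
  split
  · split
    · omega
    · have := pvFirst_bounds A x (j + 1) (by omega)
      omega
  · omega
termination_by ((A.length : Int) - j).toNat
decreasing_by omega

theorem pvInnerA_eq (A : List Int) (x : Int) (j count : Int) (hj : 0 ≤ j) :
    pvInnerA A x j count = count + pvFirst A x j - j := by
  by_cases h : j < A.length
  · by_cases hx : x ≤ PySem.List.pyGetD A j 0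
    · rw [pvInnerA, pvFirst]; simp [pvG, h, hx]
    · rw [pvInnerA, pvFirst]
      simp only [pvG, dif_pos h, if_neg hx]
      rw [pvInnerA_eq A x (j + 1) (count + 1) (by omega)]
      omega
  · rw [pvInnerA, pvFirst]; simp [h]
termination_by ((A.length : Int) - j).toNat
decreasing_by omega

theorem pvRecs_mem (A : List Int) (k : Int) :
    ∀ j ∈ pvRecs A k, k ≤ j ∧ j < A.length := by
  intro j hj
  rw [pvRecs] at hj
  split at hj
  · rcases List.mem_cons.mp hj with rfl | hmem
    · exact ⟨le_rfl, by assumption⟩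
    · have := pvRecs_mem A (k + 1) j (List.mem_of_mem_filter hmem)
      omega
  · simp at hj
termination_by ((A.length : Int) - k).toNat
decreasing_by omega

theorem pvRecs_pairwise (A : List Int) (k : Int) :
    (pvRecs A k).Pairwise (fun p q => p < q ∧ pvG A p < pvG A q) := by
  rw [pvRecs]
  split
  · refine List.Pairwise.cons ?_ ((pvRecs_pairwise A (k + 1)).filter _)
    intro j hj
    have hmem := pvRecs_mem A (k + 1) j (List.mem_of_mem_filter hj)
    have hg := (List.mem_filter.mp hj).2
    simp at hg
    exact ⟨by omega, hg⟩
  · exact List.Pairwise.nil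
termination_by ((A.length : Int) - k).toNat
decreasing_by omega

theorem find?_filter_of_imp {α : Type} (p q : α → Bool) (l : List α)
    (h : ∀ a, p a = true → q a = true) :
    (l.filter q).find? p = l.find? p := by
  induction l with
  | nil => rfl
  | cons a t ih =>
    by_cases hq : q a
    · rw [List.filter_cons_of_pos hq]
      by_cases hp : p a
      · rw [List.find?_cons_of_pos hp, List.find?_cons_of_pos hp]
      · rw [List.find?_cons_of_neg (by simpa using hp),
          List.find?_cons_of_neg (by simpa using hp)]
        exact ih
    · have hp : p a = false := by
        cases hpa : p a
        · rfl
        · exact absurd (h a hpa) (by simpa using hq)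
      rw [List.filter_cons_of_neg (by simpa using hq),
        List.find?_cons_of_neg (by simp [hp])]
      exact ih

theorem pvRecs_find (A : List Int) (x : Int) (k : Int) (hk : k ≤ A.length) :
    (pvRecs A k).find? (fun j => decide (x ≤ pvG A j)) =
      if pvFirst A x k < A.length then some (pvFirst A x k) else none := by
  rw [pvRecs]
  split
  · rename_i h
    by_cases hx : x ≤ pvG A k
    · rw [List.find?_cons_of_pos (by simpa using hx), pvFirst]
      simp [h, hx]
    · rw [List.find?_cons_of_neg (by simpa using hx),
        find?_filter_of_imp _ _ _ (fun j hpj => by simp at hpj ⊢; omega),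
        pvFirst]
      simp only [dif_pos h, if_neg hx]
      exact pvRecs_find A x (k + 1) (by omega)
  · rename_i h
    rw [pvFirst]
    simp [h]
termination_by ((A.length : Int) - k).toNat
decreasing_by omega

-- sorted-list characterisation of countP (· ≤ x)
theorem sorted_countP_iff (l : List Int) (x : Int) (hs : l.Pairwise (· ≤ ·)) :
    ∀ m, m < l.length →
      (l.getD m 0 ≤ x ↔ m < l.countP (fun v => decide (v ≤ x))) := by
  induction l with
  | nil => intro m hm; simp at hm
  | cons a t ih =>
    have hs' := List.pairwise_cons.mp hs
    intro m hm
    by_cases ha : a ≤ x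
    · have hc : (a :: t).countP (fun v => decide (v ≤ x))
          = t.countP (fun v => decide (v ≤ x)) + 1 := by
        simp [List.countP_cons, ha]
      cases m with
      | zero => simp [hc, ha]
      | succ m =>
        rw [hc]
        have := ih hs'.2 m (by simpa using hm)
        simpa using this
    · have hall : ∀ b ∈ t, ¬ b ≤ x := fun b hb => by
        have := hs'.1 b hb; omega
      have hc : (a :: t).countP (fun v => decide (v ≤ x)) = 0 := by
        rw [List.countP_eq_zero]
        intro b hb
        rcases List.mem_cons.mp hb with rfl | hb'
        · simpa using ha
        · simpa using hall b hb'
      rw [hc]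
      cases m with
      | zero => simpa using ha
      | succ m =>
        have hmt : m < t.length := by simpa using hm
        have : (a :: t).getD (m + 1) 0 = t[m] := by
          simp [List.getElem?_eq_getElem hmt]
        rw [this]
        simpa using hall t[m] (t.getElem_mem hmt)

theorem pvBisectRight_eq (l : List Int) (x : Int) (hs : l.Pairwise (· ≤ ·))
    (lo hi : Nat) (h1 : lo ≤ l.countP (fun v => decide (v ≤ x)))
    (h2 : l.countP (fun v => decide (v ≤ x)) ≤ hi) (h3 : hi ≤ l.length) :
    pvBisectRight l x lo hi = l.countP (fun v => decide (v ≤ x)) := by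
  rw [pvBisectRight]
  split
  · rename_i hlt
    have hmidlen : (lo + hi) / 2 < l.length := by omega
    have hiff := sorted_countP_iff l x hs ((lo + hi) / 2) hmidlen
    split
    · rename_i hx
      have hub : l.countP (fun v => decide (v ≤ x)) ≤ (lo + hi) / 2 := by
        by_contra hc
        have := hiff.mpr (by omega)
        omega
      exact pvBisectRight_eq l x hs lo ((lo + hi) / 2) h1 hub (by omega)
    · rename_i hx
      have hlb : (lo + hi) / 2 < l.countP (fun v => decide (v ≤ x)) :=
        hiff.mp (by omega)
      exact pvBisectRight_eq l x hs ((lo + hi) / 2 + 1) hi (by omega) h2 h3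
  · omega
termination_by hi - lo
decreasing_by all_goals omega

-- query on the reversed stack: count + index arithmetic vs find?
theorem stack_query (A : List Int) (x : Int) (R : List Int)
    (hp : R.Pairwise (fun p q => pvG A p < pvG A q)) :
    (R.find? (fun j => decide (x ≤ pvG A j)) = none ↔
        R.countP (fun j => decide (x ≤ pvG A j)) = 0) ∧
      (∀ j, R.find? (fun j => decide (x ≤ pvG A j)) = some j →
        R.reverse.getD (R.countP (fun j => decide (x ≤ pvG A j)) - 1) 0 = j) := by
  induction R with
  | nil => simp
  | cons r t ih =>
    have hp' := List.pairwise_cons.mp hp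
    by_cases hr : x ≤ pvG A r
    · have hall : ∀ b ∈ t, x ≤ pvG A b := fun b hb =>
        le_trans hr (le_of_lt (hp'.1 b hb))
      have hcount : (r :: t).countP (fun j => decide (x ≤ pvG A j)) = t.length + 1 := by
        rw [List.countP_cons,
          List.countP_eq_length.mpr (fun b hb => decide_eq_true (hall b hb))]
        simp [hr]
      constructor
      · rw [List.find?_cons_of_pos (by simpa using hr), hcount]
        simp
      · intro j hj
        rw [List.find?_cons_of_pos (by simpa using hr)] at hj
        cases hj
        rw [hcount, List.reverse_cons]
        simp [List.getD_append_right, List.length_reverse]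
    · have hcp : (r :: t).countP (fun j => decide (x ≤ pvG A j))
          = t.countP (fun j => decide (x ≤ pvG A j)) := by
        simp [List.countP_cons, hr]
      rw [List.find?_cons_of_neg (by simpa using hr), hcp]
      refine ⟨(ih hp'.2).1, ?_⟩
      intro j hj
      have h0 := (ih hp'.2).2 j hj
      have hne : t.countP (fun j => decide (x ≤ pvG A j)) ≠ 0 := by
        intro h0'
        rw [(ih hp'.2).1.mpr h0'] at hj
        cases hj
      have hle := List.countP_le_length (p := fun j => decide (x ≤ pvG A j)) (l := t)
      rw [List.reverse_cons, List.getD_append _ _ _ _ (by simp; omega)]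
      exact h0

theorem pvPop_eq (A : List Int) (a : Int) (R : List Int)
    (hp : R.Pairwise (fun p q => pvG A p < pvG A q)) :
    pvPop (R.reverse.map (fun j => -(pvG A j))) R.reverse (-a) =
      ((R.filter (fun j => decide (a < pvG A j))).reverse.map (fun j => -(pvG A j)),
        (R.filter (fun j => decide (a < pvG A j))).reverse) := by
  induction R with
  | nil =>
    simp only [List.reverse_nil, List.map_nil, List.filter_nil]
    rw [pvPop]
    simp
  | cons r t ih =>
    have hp' := List.pairwise_cons.mp hp
    simp only [List.reverse_cons, List.map_append, List.map_cons, List.map_nil]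
    by_cases hc : pvG A r ≤ a
    · rw [pvPop]
      rw [dif_pos ⟨by simp, by
        rw [PySem.List.pyGetD_neg_one_append_singleton]; omega⟩]
      rw [List.dropLast_concat, List.dropLast_concat]
      rw [List.filter_cons_of_neg (by simp; omega)]
      exact ih hp'.2
    · rw [pvPop]
      rw [dif_neg (by
        rw [not_and_or]
        right
        rw [PySem.List.pyGetD_neg_one_append_singleton]
        omega)]
      have hall : ∀ j ∈ r :: t, decide (a < pvG A j) = true := by
        intro j hj
        rcases List.mem_cons.mp hj with rfl | hj'
        · simp; omega
        · have := hp'.1 j hj'; simp; omega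
      rw [List.filter_eq_self.mpr hall]
      simp

theorem mainB (A : List Int) (k : Int) (h0 : 0 ≤ k) (hk : k ≤ A.length) :
    ((PySem.List.pyRange k (A.length) 1).reverse).foldl (pvStepB A A.length) ([], [], []) =
      (((PySem.List.pyRange k A.length 1).map (pvAns A)).reverse,
        (pvRecs A k).reverse.map (fun j => -(pvG A j)),
        (pvRecs A k).reverse) := by
  by_cases h : k < (A.length : Int)
  · rw [PySem.List.pyRange_one_cons (by omega), List.reverse_cons, List.foldl_append,
      mainB A (k + 1) (by omega) (by omega)]
    simp only [List.foldl_cons, List.foldl_nil]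
    simp only [pvStepB]
    rw [show PySem.List.pyGetD A k 0 = pvG A k from rfl]
    have hpR : (pvRecs A (k + 1)).Pairwise (fun p q => pvG A p < pvG A q) :=
      (pvRecs_pairwise A (k + 1)).imp (fun h => h.2)
    have hsort : ((pvRecs A (k + 1)).reverse.map (fun j => -(pvG A j))).Pairwise (· ≤ ·) := by
      rw [List.pairwise_map, List.pairwise_reverse]
      exact hpR.imp (fun h => by omega)
    have hb := pvBisectRight_eq ((pvRecs A (k + 1)).reverse.map (fun j => -(pvG A j)))
      (-(2 * pvG A k)) hsort 0 _ (Nat.zero_le _) (List.countP_le_length) le_rfl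
    have hcnt : ((pvRecs A (k + 1)).reverse.map (fun j => -(pvG A j))).countP
          (fun v => decide (v ≤ -(2 * pvG A k)))
        = (pvRecs A (k + 1)).countP (fun j => decide (2 * pvG A k ≤ pvG A j)) := by
      rw [List.countP_map, List.countP_reverse]
      refine List.countP_congr ?_
      intro j _
      simp only [Function.comp_apply, decide_eq_true_eq]
      omega
    rw [hb, hcnt]
    have hfind := pvRecs_find A (2 * pvG A k) (k + 1) (by omega)
    have hq := stack_query A (2 * pvG A k) (pvRecs A (k + 1)) hpR
    have hpop := pvPop_eq A (pvG A k) (pvRecs A (k + 1)) hpR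
    rw [hpop]
    have hbnd := pvFirst_bounds A (2 * pvG A k) (k + 1) (by omega)
    simp only [Prod.mk.injEq]
    refine ⟨?_, ?_, ?_⟩
    · -- result component
      rw [List.map_cons, List.reverse_cons]
      congr 1
      by_cases hF : pvFirst A (2 * pvG A k) (k + 1) < (A.length : Int)
      · rw [if_pos hF] at hfind
        have hne : (pvRecs A (k + 1)).countP (fun j => decide (2 * pvG A k ≤ pvG A j)) ≠ 0 := by
          intro h0
          rw [hq.1.mpr h0] at hfind
          cases hfind
        rw [if_pos (by omega), hq.2 _ hfind]
        unfold pvAns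
        ring_nf
      · rw [if_neg hF] at hfind
        rw [if_neg (by simp [hq.1.mp hfind])]
        unfold pvAns
        have : pvFirst A (2 * pvG A k) (k + 1) = (A.length : Int) := by omega
        rw [this]
        ring_nf
    · -- nvals component
      conv_rhs => rw [pvRecs, dif_pos h, List.reverse_cons, List.map_append,
        List.map_cons, List.map_nil]
    · -- idxs component
      conv_rhs => rw [pvRecs, dif_pos h, List.reverse_cons]
  · rw [PySem.List.pyRange_one_eq_nil (by omega), pvRecs]
    simp [h]
termination_by ((A.length : Int) - k).toNat
decreasing_by omega

-- ===== VERDICT (by name: the statement is the Claim_ definition above) =====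
theorem between_ai_2ai_spec : Claim_equal_between_ai_2ai := by
  intro A _hdom
  unfold Spec_between_ai_2ai between_ai_2ai_alt between_ai_2ai
  have hrev : PySem.List.pyRange ((A.length : Int) - 1) (-1) (-1)
      = (PySem.List.pyRange 0 (A.length) 1).reverse := by
    simpa using PySem.List.pyRange_neg_one_eq_reverse ((A.length : Int) - 1) (-1)
  rw [hrev, mainB A 0 le_rfl (by positivity)]
  rw [PySem.List.foldl_append_singleton_eq_map]
  simp only [List.nil_append, List.reverse_reverse]
  refine List.map_congr_left ?_
  intro i hi
  have h0 : 0 ≤ i := by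
    have := (PySem.List.mem_pyRange_one.mp hi).1; omega
  have h1 : (0:Int) ≤ i + 1 := by omega
  rw [pvInnerA_eq A _ _ _ (by omega)]
  unfold pvAns pvG
  ring
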